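-- pv_equiv track=rewrite | github.com/mblayman/markwiki | markwiki/wiki.py | _get_sections_from_parts
-- ===== SOURCE A (Python) =====
-- from collections import namedtuple
--
-- Section = namedtuple('Section', ['name', 'path'])
--
-- def _get_sections_from_parts(section_parts):
--     '''Transform the section parts into sections usable by view templates.'''
--     sections = []
--
--     section_path = []
--     for part in section_parts:
--         if part is '':
--             continue
--
--         section_path.append(part)
--         # Put the sections parts together to generate the section path.
--         sections.append(Section(part, '/'.join(section_path)))
--
--     return sections
-- ===== SOURCE B (Python) =====
-- from collections import namedtuple
--
-- Section = namedtuple('Section', ['name', 'path'])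
--
-- def _get_sections_from_parts(section_parts):
--     '''Transform the section parts into sections usable by view templates.'''
--     kept = [part for part in section_parts if part is not '']
--     # Join once; every cumulative section path is a length-computed prefix of it.
--     full = '/'.join(kept)
--     sections = []
--     end = -1
--     for name in kept:
--         end += len(name) + 1
--         sections.append(Section(name, full[:end]))
--     return sections
-- ===== Notes on version B (the rewrite author's own statement) =====
-- stated objective: alternative
-- what changed: Instead of maintaining a growing list of parts and re-joining it at every iteration, B joins the kept parts once into the full path string and produces each cumulative section path as a prefix slice of that string at a running length offset.
import Mathlib
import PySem

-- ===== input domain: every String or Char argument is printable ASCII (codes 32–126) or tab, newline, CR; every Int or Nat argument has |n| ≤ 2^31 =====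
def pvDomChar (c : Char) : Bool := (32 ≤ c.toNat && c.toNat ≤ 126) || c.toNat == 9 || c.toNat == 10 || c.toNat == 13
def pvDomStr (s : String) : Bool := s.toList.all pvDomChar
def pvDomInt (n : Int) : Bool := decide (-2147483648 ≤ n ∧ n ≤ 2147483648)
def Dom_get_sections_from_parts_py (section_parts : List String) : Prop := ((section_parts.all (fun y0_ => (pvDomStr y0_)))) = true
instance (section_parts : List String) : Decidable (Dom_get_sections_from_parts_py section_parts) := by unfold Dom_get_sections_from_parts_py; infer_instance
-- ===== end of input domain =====

-- B joins the kept parts once and takes each cumulative path as a length-computed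
-- prefix slice of that one string, instead of re-joining a growing list each step
-- (objective: alternative; same asymptotic cost).

-- ===== PORT A =====
-- Loop state: (sections built so far, section_path built so far); '/'.join = PySem.Str.join.
def get_sections_from_parts_py (section_parts : List String) : List (String × String) :=
  (section_parts.foldl
    (fun (st : List (String × String) × List String) part =>
      if part = "" then st
      else (st.1 ++ [(part, PySem.Str.join "/" (st.2 ++ [part]))], st.2 ++ [part]))
    ([], [])).1

-- ===== PORT B =====
-- kept = filter; full = one '/'.join; loop state: (sections, end); full[:end] = Str.slice.
def get_sections_from_parts_py_alt (section_parts : List String) : List (String × String) :=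
  let kept := section_parts.filter (fun part => part != "")
  let full := PySem.Str.join "/" kept
  (kept.foldl
    (fun (st : List (String × String) × Int) name =>
      let e := st.2 + (PySem.Str.len name : Int) + 1
      (st.1 ++ [(name, PySem.Str.slice full none (some e))], e))
    ([], -1)).1

-- ===== PRECONDITION & SPEC =====
def Spec_get_sections_from_parts_py (section_parts : List String) (out : List (String × String)) : Prop := out = get_sections_from_parts_py_alt section_parts
instance (section_parts : List String) (out : List (String × String)) : Decidable (Spec_get_sections_from_parts_py section_parts out) := by unfold Spec_get_sections_from_parts_py; infer_instance

-- ===== CLAIM (what is proved, stated in full; the proofs are below) =====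
def Claim_equal_get_sections_from_parts_py : Prop := ∀ (section_parts : List String), Dom_get_sections_from_parts_py section_parts → Spec_get_sections_from_parts_py section_parts (get_sections_from_parts_py section_parts)

-- ===== LEMMAS AND PROOFS =====

-- Recursive characterisation of A's loop (proof helper).
def mkA (path : List String) : List String → List (String × String)
  | [] => []
  | p :: ps =>
    if p = "" then mkA path ps
    else (p, PySem.Str.join "/" (path ++ [p])) :: mkA (path ++ [p]) ps

-- Recursive characterisation of B's loop (proof helper).
def mkC (full : String) (e : Int) : List String → List (String × String)
  | [] => []
  | n :: ns =>
    (n, PySem.Str.slice full none (some (e + (PySem.Str.len n : Int) + 1))) ::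
      mkC full (e + (PySem.Str.len n : Int) + 1) ns

theorem foldA_eq_mkA (ks : List String) (secs : List (String × String)) (path : List String) :
    (ks.foldl
      (fun (st : List (String × String) × List String) part =>
        if part = "" then st
        else (st.1 ++ [(part, PySem.Str.join "/" (st.2 ++ [part]))], st.2 ++ [part]))
      (secs, path)).1 = secs ++ mkA path ks := by
  induction ks generalizing secs path with
  | nil => simp [mkA]
  | cons p ps ih =>
      by_cases hp : p = "" <;> simp [mkA, hp, ih, List.append_assoc]

theorem foldB_eq_mkC (full : String) (ks : List String) (secs : List (String × String)) (e : Int) :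
    (ks.foldl
      (fun (st : List (String × String) × Int) name =>
        let e := st.2 + (PySem.Str.len name : Int) + 1
        (st.1 ++ [(name, PySem.Str.slice full none (some e))], e))
      (secs, e)).1 = secs ++ mkC full e ks := by
  induction ks generalizing secs e with
  | nil => simp [mkC]
  | cons n ns ih =>
      simp only [List.foldl_cons]
      rw [ih]
      simp [mkC]

theorem chars_join_split (sep : List Char) (l1 l2 : List (List Char)) (h1 : l1 ≠ []) (h2 : l2 ≠ []) :
    PySem.Chars.join sep (l1 ++ l2) = PySem.Chars.join sep l1 ++ sep ++ PySem.Chars.join sep l2 := by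
  induction l1 with
  | nil => exact absurd rfl h1
  | cons x t ih =>
      cases t with
      | nil =>
          cases l2 with
          | nil => exact absurd rfl h2
          | cons y t2 => simp [PySem.Chars.join_cons_cons, PySem.Chars.join_singleton]
      | cons y t' =>
          have := ih (by simp)
          simp only [List.cons_append, PySem.Chars.join_cons_cons] at *
          simp [this, List.append_assoc]

theorem str_join_singleton (sep p : String) : PySem.Str.join sep [p] = p := by
  apply String.toList_inj.mp
  simp [PySem.Str.toList_join, PySem.Chars.join_singleton]

theorem str_join_append (sep p : String) (l : List String) (h : l ≠ []) :
    PySem.Str.join sep (l ++ [p]) = PySem.Str.join sep l ++ sep ++ p := by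
  apply String.toList_inj.mp
  simp only [PySem.Str.toList_join, List.map_append, List.map_cons, List.map_nil,
    String.toList_append]
  have := chars_join_split sep.toList (l.map String.toList) [p.toList] (by simpa using h) (by simp)
  simpa [PySem.Chars.join_singleton] using this

-- A prefix slice of the full join, cut at the length of the join of an initial
-- segment, IS the join of that initial segment.
theorem slice_join_prefix (pre rest : List String) (hpre : pre ≠ []) :
    PySem.Str.slice (PySem.Str.join "/" (pre ++ rest)) none
        (some ((PySem.Str.join "/" pre).toList.length : Int))
      = PySem.Str.join "/" pre := by
  apply String.toList_inj.mp
  rw [PySem.Str.toList_slice]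
  simp only [PySem.Chars.slice_eq_listSlice]
  rw [PySem.List.slice_to_natCast]
  cases rest with
  | nil => simp
  | cons r rs =>
      have : PySem.Str.join "/" (pre ++ (r :: rs))
          = PySem.Str.join "/" pre ++ "/" ++ PySem.Str.join "/" (r :: rs) := by
        apply String.toList_inj.mp
        simp only [PySem.Str.toList_join, List.map_append, String.toList_append]
        exact chars_join_split _ _ _ (by simpa using hpre) (by simp)
      rw [this]
      simp

-- Invariant carried through B's loop: e is the length (as Int) of the join of the
-- processed prefix (−1 for the empty prefix), and full is the join of everything.
theorem mkC_eq_mkA (rest : List String) (pre : List String) (e : Int)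
    (hrest : ∀ x ∈ rest, x ≠ "")
    (he : (pre = [] ∧ e = -1) ∨ (pre ≠ [] ∧ e = ((PySem.Str.join "/" pre).toList.length : Int))) :
    mkC (PySem.Str.join "/" (pre ++ rest)) e rest = mkA pre rest := by
  induction rest generalizing pre e with
  | nil => simp [mkC, mkA]
  | cons n ns ih =>
      have hn : n ≠ "" := hrest n (by simp)
      have hn0 : (0:Int) ≤ PySem.Str.len n := by simp [PySem.Str.len_eq]
      have he0 : (-1:Int) ≤ e := by
        rcases he with ⟨_, h⟩ | ⟨_, h⟩ <;> subst h <;> omega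
      have hlen : (PySem.Str.join "/" (pre ++ [n])).toList.length
          = (e + (PySem.Str.len n : Int) + 1).toNat := by
        rcases he with ⟨hp, he⟩ | ⟨hp, he⟩
        · subst hp he
          simp [str_join_singleton, PySem.Str.len_eq]
        · rw [str_join_append "/" n pre hp, he]
          simp [PySem.Str.len_eq]
          omega
      have hslice : PySem.Str.slice (PySem.Str.join "/" (pre ++ (n :: ns))) none
            (some (e + (PySem.Str.len n : Int) + 1)) = PySem.Str.join "/" (pre ++ [n]) := by
        have hb : (e + (PySem.Str.len n : Int) + 1)
            = (((PySem.Str.join "/" (pre ++ [n])).toList.length : Int)) := by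
          rw [hlen]; omega
        rw [hb]
        have := slice_join_prefix (pre ++ [n]) ns (by simp)
        simpa [List.append_assoc] using this
      simp only [mkC, mkA, if_neg hn]
      rw [hslice]
      congr 1
      have := ih (pre ++ [n]) (e + (PySem.Str.len n : Int) + 1)
        (fun x hx => hrest x (by simp [hx]))
        (Or.inr ⟨by simp, by rw [hlen]; omega⟩)
      simpa [List.append_assoc] using this

-- A's loop ignores empty parts, so it equals itself on the filtered input.
theorem mkA_filter (ks : List String) (path : List String) :
    mkA path ks = mkA path (ks.filter (fun p => p != "")) := by
  induction ks generalizing path with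
  | nil => rfl
  | cons p ps ih =>
      by_cases hp : p = ""
      · simp [mkA, hp, List.filter, ih]
      · have h : (p != "") = true := by simp [hp]
        simp [mkA, hp, List.filter, h, ih]

-- ===== VERDICT (by name: the statement is the Claim_ definition above) =====
theorem get_sections_from_parts_py_spec : Claim_equal_get_sections_from_parts_py := by
  intro sp _
  unfold Spec_get_sections_from_parts_py get_sections_from_parts_py get_sections_from_parts_py_alt
  rw [foldA_eq_mkA, foldB_eq_mkC]
  simp only [List.nil_append]
  rw [mkA_filter sp []]
  exact (mkC_eq_mkA (sp.filter (fun p => p != "")) [] (-1)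
    (fun x hx => by simpa using (List.mem_filter.mp hx).2) (Or.inl ⟨rfl, rfl⟩)).symm
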